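-- pv_equiv track=rewrite | github.com/clivepato93/Edabit_challenges | Python/Hard/remove_letters.py | remove_letters
-- ===== SOURCE A (Python) =====
-- def remove_letters(letters, word):
--     f=[]
--     for i in letters:
--         if i in f:
--             continue
--
--         elif i not in word or letters.count(i)>word.count(i):
--             f.append(i)
--     return f
-- ===== SOURCE B (Python) =====
-- def remove_letters(letters, word):
--     # Recursive: take the head, decide it once by pure count comparison
--     # (the 'not in word' disjunct of A is redundant: a non-substring has
--     # word-count 0 while the head occurs at least once), strip all of its
--     # duplicates from the tail, and recurse on the shortened list.
--     if not letters:
--         return []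
--     i = letters[0]
--     rest = [x for x in letters[1:] if x != i]
--     head = [i] if letters.count(i) > word.count(i) else []
--     return head + remove_letters(rest, word)
-- ===== Notes on version B (the rewrite author's own statement) =====
-- stated objective: alternative
-- what changed: B replaces A's seen-list loop with a recursive divide-and-conquer that decides the head by a single count comparison (dropping A's redundant 'not in word' test) and strips the head's duplicates from the tail before recursing.
import Mathlib
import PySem

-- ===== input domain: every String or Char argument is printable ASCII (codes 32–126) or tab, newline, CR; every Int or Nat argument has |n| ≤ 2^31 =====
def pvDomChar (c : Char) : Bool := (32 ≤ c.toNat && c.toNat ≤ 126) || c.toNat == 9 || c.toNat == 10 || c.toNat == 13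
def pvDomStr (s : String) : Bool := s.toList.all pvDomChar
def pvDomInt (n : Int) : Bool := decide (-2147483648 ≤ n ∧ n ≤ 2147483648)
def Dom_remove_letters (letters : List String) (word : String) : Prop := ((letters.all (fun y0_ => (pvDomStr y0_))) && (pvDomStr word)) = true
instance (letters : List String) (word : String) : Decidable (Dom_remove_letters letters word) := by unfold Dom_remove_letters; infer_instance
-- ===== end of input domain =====

-- B is a recursive divide-and-conquer: decide the head by a single count comparison (A's 'not in word'
-- disjunct is redundant), strip the head's duplicates from the tail, recurse; alternative decomposition, same cost class.

-- ===== PORT A =====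
def remove_letters (letters : List String) (word : String) : List String :=
  letters.foldl (fun f i =>
    if f.contains i then f
    else if (!PySem.Str.isIn i word) || decide (PySem.List.count letters i > PySem.Str.count word i) then f ++ [i]
    else f) []

-- ===== PORT B =====
def remove_letters_alt (letters : List String) (word : String) : List String :=
  match letters with
  | [] => []
  | i :: tl =>
    let rest := tl.filter (fun x => !(x == i))
    let head := if PySem.List.count (i :: tl) i > PySem.Str.count word i then [i] else []
    head ++ remove_letters_alt rest word
termination_by letters.length
decreasing_by
  simp only [List.length_cons, List.length_unattach]
  exact Nat.lt_succ_of_le (le_trans (List.length_filter_le _ _) (by simp))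

-- ===== PRECONDITION & SPEC =====
def Spec_remove_letters (letters : List String) (word : String) (out : List String) : Prop := out = remove_letters_alt letters word
instance (letters : List String) (word : String) (out : List String) : Decidable (Spec_remove_letters letters word out) := by unfold Spec_remove_letters; infer_instance

-- ===== CLAIM (what is proved, stated in full; the proofs are below) =====
def Claim_equal_remove_letters : Prop := ∀ (letters : List String) (word : String), Dom_remove_letters letters word → Spec_remove_letters letters word (remove_letters letters word)

-- ===== LEMMAS AND PROOFS =====

-- A's loop from a state (ofList s).filter p extends it to (ofList (s ++ l)).filter p.
theorem removeLetters_foldl_filter (p : String → Bool) (l : List String) : ∀ (s : List String),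
    l.foldl (fun f i => if f.contains i then f else if p i then f ++ [i] else f)
        ((PySem.Set.ofList s).filter p)
      = (PySem.Set.ofList (s ++ l)).filter p := by
  induction l with
  | nil => intro s; simp
  | cons i l ih =>
    intro s
    have h1 : (s ++ i :: l) = (s ++ [i]) ++ l := by simp
    rw [h1, ← ih (s ++ [i])]
    simp only [List.foldl_cons]
    congr 1
    have hof : PySem.Set.ofList (s ++ [i]) = (PySem.Set.ofList s).add i := by
      simp [PySem.Set.ofList_eq_foldl, PySem.Set.add]
    by_cases hmem : i ∈ (PySem.Set.ofList s).filter p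
    · have : ((PySem.Set.ofList s).filter p).contains i = true := by simpa using hmem
      rw [this]
      simp only [if_true]
      have hi : i ∈ s := by
        have := (List.mem_filter.mp hmem).1
        simpa [PySem.Set.mem_ofList] using this
      rw [hof, PySem.Set.add]
      simp [hi, PySem.Set.mem_ofList]
    · have hc : ((PySem.Set.ofList s).filter p).contains i = false := by simpa using hmem
      rw [hc]
      simp only [Bool.false_eq_true, if_false]
      by_cases hi : i ∈ s
      · have hi' : i ∈ PySem.Set.ofList s := (PySem.Set.mem_ofList s i).mpr hi
        have hp : p i = false := by
          by_contra h
          exact hmem (List.mem_filter.mpr ⟨hi', by simpa using h⟩)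
        rw [hof, PySem.Set.add]
        simp [hi, hp, PySem.Set.mem_ofList]
      · rw [hof, PySem.Set.add]
        have hni : i ∉ PySem.Set.ofList s := fun h => hi ((PySem.Set.mem_ofList s i).mp h)
        have hcf : (PySem.Set.ofList s).contains i = false := by
          cases h : (PySem.Set.ofList s).contains i
          · rfl
          · exact absurd (by simpa using h) hni
        rw [hcf]
        simp only [Bool.false_eq_true, if_false, List.filter_append]
        by_cases hp : p i = true <;> simp [hp]

-- a non-substring's count is 0 (go never finds a prefix)
theorem charsCount_go_of_not_infix (sub : List Char) (fuel : Nat) : ∀ (l : List Char) (acc : Nat),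
    ¬ sub <:+: l → PySem.Chars.count.go sub fuel l acc = acc := by
  induction fuel with
  | zero => intro l acc _; cases l <;> rfl
  | succ fuel ih =>
    intro l acc h
    cases l with
    | nil => rfl
    | cons c t =>
      have hpre : sub.isPrefixOf (c :: t) = false := by
        cases hp : sub.isPrefixOf (c :: t)
        · rfl
        · exact absurd (List.IsPrefix.isInfix (List.isPrefixOf_iff_prefix.mp hp)) h
      have ht : ¬ sub <:+: t := fun hi => h (hi.trans (List.suffix_cons c t).isInfix)
      simp only [PySem.Chars.count.go, hpre]
      exact ih t acc ht

theorem charsCount_eq_zero_of_not_isIn (sub s : List Char) (h : PySem.Chars.isIn sub s = false) :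
    PySem.Chars.count s sub = 0 := by
  have hne : sub ≠ [] := by
    intro he; rw [he] at h; simp [PySem.Chars.isIn_nil] at h
  have hni : ¬ sub <:+: s := (PySem.Chars.isIn_eq_false_iff sub s).mp h
  have hie : sub.isEmpty = false := by simpa using hne
  simp only [PySem.Chars.count, hie, Bool.false_eq_true, if_false]
  exact charsCount_go_of_not_infix sub s.length s 0 hni

-- dedup commutes with filter
theorem setOfList_filter {α : Type} [BEq α] [LawfulBEq α] (p : α → Bool) (xs : List α) :
    PySem.Set.ofList (xs.filter p) = (PySem.Set.ofList xs).filter p := by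
  induction xs with
  | nil => rfl
  | cons x xs ih =>
    by_cases hp : p x = true
    · rw [List.filter_cons_of_pos hp, PySem.Set.ofList_cons, PySem.Set.ofList_cons, ih]
      rw [List.filter_cons_of_pos hp]
      congr 1
      simp [PySem.Set.discard, List.filter_filter, Bool.and_comm]
    · rw [List.filter_cons_of_neg (by simpa using hp), PySem.Set.ofList_cons, ih]
      rw [List.filter_cons_of_neg (by simpa using hp)]
      simp [PySem.Set.discard, List.filter_filter]
      congr 1
      funext y
      by_cases hy : y = x
      · subst hy; simp [hp]
      · simp [hy]

-- B computes the first-occurrence dedup filtered by the count comparison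
theorem removeLetters_alt_eq_filter (word : String) : ∀ (n : Nat) (letters : List String),
    letters.length ≤ n →
    remove_letters_alt letters word
      = (PySem.Set.ofList letters).filter
          (fun i => decide (PySem.List.count letters i > PySem.Str.count word i)) := by
  intro n
  induction n with
  | zero =>
    intro letters hlen
    have : letters = [] := List.eq_nil_of_length_eq_zero (Nat.le_zero.mp hlen)
    subst this
    simp [remove_letters_alt]
  | succ n ih =>
    intro letters hlen
    cases letters with
    | nil => simp [remove_letters_alt]
    | cons i tl =>
      have htl : tl.length ≤ n := by simpa using hlen
      have hrlen : (tl.filter (fun x => !(x == i))).length ≤ n :=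
        le_trans (List.length_filter_le _ _) htl
      rw [remove_letters_alt]
      rw [ih _ hrlen]
      rw [PySem.Set.ofList_cons, List.filter_cons]
      have hrest : PySem.Set.ofList (tl.filter (fun x => !(x == i)))
          = (PySem.Set.ofList tl).filter (fun x => !(x == i)) :=
        setOfList_filter (fun x => !(x == i)) tl
      have hdisc : (PySem.Set.ofList tl).discard i
          = (PySem.Set.ofList tl).filter (fun x => !(x == i)) := by
        simp [PySem.Set.discard]
      have hcnt : ∀ j ∈ PySem.Set.ofList (tl.filter (fun x => !(x == i))),
          decide (PySem.List.count (tl.filter (fun x => !(x == i))) j > PySem.Str.count word j)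
            = decide (PySem.List.count (i :: tl) j > PySem.Str.count word j) := by
        intro j hj
        have hjr : j ∈ tl.filter (fun x => !(x == i)) :=
          (PySem.Set.mem_ofList _ j).mp hj
        have hji : j ≠ i := by
          have := (List.mem_filter.mp hjr).2
          simpa using this
        have hcj : PySem.List.count (tl.filter (fun x => !(x == i))) j
            = PySem.List.count (i :: tl) j := by
          rw [PySem.List.count_eq, PySem.List.count_eq]
          rw [List.count_filter (by simpa using hji)]
          simp [Ne.symm hji]
        rw [hcj]
      rw [List.filter_congr hcnt, hrest, ← hdisc]
      simp only [decide_eq_true_eq]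
      split <;> rfl

-- on elements of the list, A's two-branch test equals B's single count comparison
theorem cond_eq_on_mem (letters : List String) (word : String) (i : String) (hi : i ∈ letters) :
    ((!PySem.Str.isIn i word) || decide (PySem.List.count letters i > PySem.Str.count word i))
      = decide (PySem.List.count letters i > PySem.Str.count word i) := by
  cases hin : PySem.Str.isIn i word with
  | true => simp
  | false =>
    have hin' : PySem.Chars.isIn i.toList word.toList = false := by
      rw [← PySem.Str.isIn_eq]; exact hin
    have hw : PySem.Chars.count word.toList i.toList = 0 :=
      charsCount_eq_zero_of_not_isIn _ _ hin'
    have hl : 0 < List.count i letters := List.count_pos_iff.mpr hi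
    simp [PySem.Str.count_eq, PySem.List.count_eq, hw, hl]

-- ===== VERDICT (by name: the statement is the Claim_ definition above) =====
theorem remove_letters_spec : Claim_equal_remove_letters := by
  unfold Claim_equal_remove_letters
  intro letters word _
  unfold Spec_remove_letters remove_letters
  have hA := removeLetters_foldl_filter
    (fun i => (!PySem.Str.isIn i word) || decide (PySem.List.count letters i > PySem.Str.count word i))
    letters []
  simp only [List.nil_append] at hA
  rw [show ((PySem.Set.ofList ([] : List String)).filter _) = ([] : List String) from rfl] at hA
  rw [hA, removeLetters_alt_eq_filter word letters.length letters le_rfl]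
  apply List.filter_congr
  intro i hi
  exact cond_eq_on_mem letters word i ((PySem.Set.mem_ofList letters i).mp hi)
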